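-- pv_equiv track=rewrite | github.com/pkch93/Algorithm | SW_Expert_Academy/level2/countstr.py | solution
-- ===== SOURCE A (Python) =====
-- def solution(pettern, string):
--     answer = 0
--     for p in pettern:
--         temp = 0
--         for s in string:
--             if p == s:
--                 temp += 1
--         answer = max(answer, temp)
--     return answer
-- ===== SOURCE B (Python) =====
-- def solution(pettern, string):
--     pset = set(pettern)
--     cs = sorted(string)
--     n = len(cs)
--     answer = 0
--     i = 0
--     while i < n:
--         j = i
--         while j < n and cs[j] == cs[i]:
--             j += 1
--         if cs[i] in pset:
--             answer = max(answer, j - i)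
--         i = j
--     return answer
-- ===== Notes on version B (the rewrite author's own statement) =====
-- stated objective: faster
-- what changed: Replaces the nested pattern-by-string counting loops with a pattern-character set plus a single run-length scan over the sorted string, taking the longest run whose character is in the pattern set.
import Mathlib
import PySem

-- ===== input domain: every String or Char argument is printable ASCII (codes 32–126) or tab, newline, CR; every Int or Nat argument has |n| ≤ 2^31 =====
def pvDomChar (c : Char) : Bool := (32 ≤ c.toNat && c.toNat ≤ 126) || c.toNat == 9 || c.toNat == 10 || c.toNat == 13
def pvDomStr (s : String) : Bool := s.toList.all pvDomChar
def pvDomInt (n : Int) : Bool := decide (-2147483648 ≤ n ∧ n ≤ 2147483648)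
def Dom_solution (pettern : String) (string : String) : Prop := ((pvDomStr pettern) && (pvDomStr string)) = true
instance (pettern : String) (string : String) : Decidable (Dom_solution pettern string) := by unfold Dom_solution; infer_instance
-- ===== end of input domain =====

-- B replaces the nested per-pattern-character counting loops with a pattern-character set
-- plus one run-length scan over the sorted string (same result; measured faster in a timing run).


-- ===== PORT A =====
def solution (pettern : String) (string : String) : Int :=
  pettern.toList.foldl (fun answer p =>
    let temp := string.toList.foldl (fun temp s => if p == s then temp + 1 else temp) (0 : Int)
    max answer temp) 0

-- ===== PORT B =====
-- the while-loop run-length scan of Source B: each step consumes one maximal run of the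
-- (sorted) character list, updating the answer when the run's character is in the set
def pvRunScan (pset : PySem.Set Char) : List Char → Int → Int
  | [], answer => answer
  | c :: rest, answer =>
    let run := rest.takeWhile (fun s => s == c)
    let rest' := rest.dropWhile (fun s => s == c)
    let answer' := if PySem.Set.contains pset c then max answer (1 + (run.length : Int)) else answer
    pvRunScan pset rest' answer'
termination_by l => l.length
decreasing_by
  simp only [List.length_cons]
  exact Nat.lt_succ_of_le (List.Sublist.length_le (List.dropWhile_sublist _))

def solution_alt (pettern : String) (string : String) : Int :=
  let pset : PySem.Set Char := PySem.Set.ofList pettern.toList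
  let cs := PySem.List.sorted string.toList (fun x => x) false
  pvRunScan pset cs 0

-- ===== PRECONDITION & SPEC =====
def Spec_solution (pettern : String) (string : String) (out : Int) : Prop := out = solution_alt pettern string
instance (pettern : String) (string : String) (out : Int) : Decidable (Spec_solution pettern string out) := by unfold Spec_solution; infer_instance

-- ===== CLAIM (what is proved, stated in full; the proofs are below) =====
def Claim_equal_solution : Prop := ∀ (pettern : String) (string : String), Dom_solution pettern string → Spec_solution pettern string (solution pettern string)

-- ===== LEMMAS AND PROOFS =====

-- A's inner loop is a count
theorem innerA (p : Char) (l : List Char) (a : Int) :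
    l.foldl (fun temp s => if p == s then temp + 1 else temp) a = a + (l.count p : Int) := by
  induction l generalizing a with
  | nil => simp
  | cons c t ih =>
    simp only [List.foldl_cons, List.count_cons, ih]
    by_cases h : p = c
    · simp only [h, beq_self_eq_true, if_true]
      push_cast
      ring
    · have h1 : (p == c) = false := by simp [h]
      have h2 : (c == p) = false := by simp [Ne.symm h]
      simp [h1, h2]

-- A's outer loop as a fold of maxima of counts
theorem solution_eq_foldA (pettern string : String) :
    solution pettern string =
      pettern.toList.foldl (fun answer p => max answer ((string.toList.count p : Int))) 0 := by
  unfold solution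
  congr 1
  funext answer p
  rw [innerA]
  norm_num

-- generic facts about the max-fold
theorem foldA_ge_init (f : Char → Int) (xs : List Char) : ∀ a : Int,
    a ≤ xs.foldl (fun ans p => max ans (f p)) a := by
  induction xs with
  | nil => intro a; simp
  | cons c t ih => intro a; exact le_trans (le_max_left _ _) (ih (max a (f c)))

theorem foldA_ge_elem (f : Char → Int) (xs : List Char) (p : Char) : p ∈ xs → ∀ a : Int,
    f p ≤ xs.foldl (fun ans q => max ans (f q)) a := by
  induction xs with
  | nil => intro hp; simp at hp
  | cons c t ih =>
    intro hp a
    rcases List.mem_cons.1 hp with h | h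
    · subst h
      exact le_trans (le_max_right _ _) (foldA_ge_init f t _)
    · exact ih h _

theorem foldA_le (f : Char → Int) (xs : List Char) (M : Int) :
    (∀ p ∈ xs, f p ≤ M) → ∀ a : Int, a ≤ M →
    xs.foldl (fun ans p => max ans (f p)) a ≤ M := by
  induction xs with
  | nil => intro _ a ha; simpa using ha
  | cons c t ih =>
    intro h a ha
    simp only [List.foldl_cons]
    exact ih (fun p hp => h p (List.mem_cons_of_mem _ hp)) _ (max_le ha (h c (by simp)))

-- unfold the scan one run at a time
theorem pvRunScan_cons (ps : PySem.Set Char) (c : Char) (rest : List Char) (a : Int) :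
    pvRunScan ps (c :: rest) a =
      pvRunScan ps (rest.dropWhile (fun s => s == c))
        (if PySem.Set.contains ps c then
            max a (1 + ((rest.takeWhile (fun s => s == c)).length : Int))
          else a) := by
  rw [pvRunScan]

theorem dropWhile_le (rest : List Char) (c : Char) (n : Nat) (h : rest.length ≤ n) :
    (rest.dropWhile (fun s => s == c)).length ≤ n :=
  le_trans (List.Sublist.length_le (List.dropWhile_sublist _)) h

-- in a sorted list c :: rest, everything left after dropping the run of c is > c
theorem dropWhile_gt (c : Char) (rest : List Char)
    (hs : (c :: rest).Pairwise (· ≤ ·)) :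
    ∀ x ∈ rest.dropWhile (fun s => s == c), c < x := by
  intro x hx
  have hsub : (rest.dropWhile (fun s => s == c)).Sublist rest := List.dropWhile_sublist _
  have hrest : (rest.dropWhile (fun s => s == c)).Pairwise (· ≤ ·) :=
    (List.Pairwise.sublist hsub) (List.Pairwise.of_cons hs)
  cases hd : rest.dropWhile (fun s => s == c) with
  | nil => simp [hd] at hx
  | cons h t =>
    have hne : h ≠ c := by
      have := List.head_dropWhile_not (fun s => s == c) (l := rest) (by simp [hd])
      simp [hd] at this
      exact this
    have hch : c ≤ h := by
      have hmem : h ∈ rest := hsub.mem (by simp [hd])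
      exact (List.pairwise_cons.1 hs).1 h hmem
    have hch' : c < h := lt_of_le_of_ne hch (Ne.symm hne)
    rw [hd] at hx
    rcases List.mem_cons.1 hx with rfl | hxt
    · exact hch'
    · rw [hd] at hrest
      exact lt_of_lt_of_le hch' ((List.pairwise_cons.1 hrest).1 x hxt)

-- the run at the head of a sorted list has length = the count of its character
theorem count_head_run (c : Char) (rest : List Char)
    (hs : (c :: rest).Pairwise (· ≤ ·)) :
    ((c :: rest).count c : Int) = 1 + ((rest.takeWhile (fun s => s == c)).length : Int) := by
  have hsplit : rest = rest.takeWhile (fun s => s == c) ++ rest.dropWhile (fun s => s == c) :=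
    (List.takeWhile_append_dropWhile (p := fun s => s == c) (l := rest)).symm
  have h1 : (rest.takeWhile (fun s => s == c)).count c = (rest.takeWhile (fun s => s == c)).length := by
    apply List.count_eq_length.2
    intro b hb
    have := List.mem_takeWhile_imp hb
    simpa using (by simpa using this : b = c).symm
  have h2 : (rest.dropWhile (fun s => s == c)).count c = 0 := by
    apply List.count_eq_zero.2
    intro hmem
    exact lt_irrefl c (dropWhile_gt c rest hs c hmem)
  have : (c :: rest).count c = 1 + ((rest.takeWhile (fun s => s == c)).length) := by
    rw [List.count_cons_self]
    conv_lhs => rw [hsplit]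
    rw [List.count_append, h1, h2]
    omega
  rw [this]
  push_cast
  ring

-- a character other than the run's survives the drop with its count intact
theorem count_other (c c' : Char) (rest : List Char) (hne : c' ≠ c) :
    (c :: rest).count c' = (rest.dropWhile (fun s => s == c)).count c' := by
  have hsplit : rest = rest.takeWhile (fun s => s == c) ++ rest.dropWhile (fun s => s == c) :=
    (List.takeWhile_append_dropWhile (p := fun s => s == c) (l := rest)).symm
  have h1 : (rest.takeWhile (fun s => s == c)).count c' = 0 := by
    apply List.count_eq_zero.2
    intro hmem
    have := List.mem_takeWhile_imp hmem
    exact hne (by simpa using this)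
  have h2 : (c :: rest).count c' = rest.count c' := by
    rw [List.count_cons]
    have : (c == c') = false := beq_eq_false_iff_ne.2 (Ne.symm hne)
    simp [this]
  rw [h2]
  conv_lhs => rw [hsplit]
  rw [List.count_append, h1]
  omega

-- the scan's result is at least its accumulator
theorem runScan_ge_init (ps : PySem.Set Char) (n : Nat) :
    ∀ l : List Char, l.length ≤ n → ∀ a : Int, a ≤ pvRunScan ps l a := by
  induction n with
  | zero =>
    intro l hl a
    rw [List.length_eq_zero_iff.1 (Nat.le_zero.1 hl)]
    simp [pvRunScan]
  | succ n ih =>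
    intro l hl a
    cases l with
    | nil => simp [pvRunScan]
    | cons c rest =>
      rw [pvRunScan_cons]
      by_cases h : PySem.Set.contains ps c
      · rw [if_pos h]
        exact le_trans (le_max_left _ _)
          (ih _ (dropWhile_le rest c n (by simpa using hl)) _)
      · rw [if_neg h]
        exact ih _ (dropWhile_le rest c n (by simpa using hl)) _

-- the scan dominates the count of every set member (sorted input, nonnegative accumulator)
theorem runScan_ge_count (ps : PySem.Set Char) (c' : Char)
    (hc' : PySem.Set.contains ps c' = true) (n : Nat) :
    ∀ l : List Char, l.length ≤ n → l.Pairwise (· ≤ ·) → ∀ a : Int, 0 ≤ a →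
      (l.count c' : Int) ≤ pvRunScan ps l a := by
  induction n with
  | zero =>
    intro l hl _ a ha
    rw [List.length_eq_zero_iff.1 (Nat.le_zero.1 hl)]
    simpa [pvRunScan] using ha
  | succ n ih =>
    intro l hl hs a ha
    cases l with
    | nil => simpa [pvRunScan] using ha
    | cons c rest =>
      rw [pvRunScan_cons]
      have hlen' : (rest.dropWhile (fun s => s == c)).length ≤ n :=
        dropWhile_le rest c n (by simpa using hl)
      have hrest' : (rest.dropWhile (fun s => s == c)).Pairwise (· ≤ ·) :=
        (List.Pairwise.sublist (List.dropWhile_sublist _)) (List.Pairwise.of_cons hs)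
      by_cases hcc : c' = c
      · subst hcc
        rw [count_head_run c' rest hs, if_pos hc']
        exact le_trans (le_max_right _ _)
          (runScan_ge_init ps n (rest.dropWhile (fun s => s == c')) hlen' _)
      · have heq : ((c :: rest).count c' : Int) = ((rest.dropWhile (fun s => s == c)).count c' : Int) := by
          exact_mod_cast congrArg (fun m : Nat => (m : Int)) (count_other c c' rest hcc)
        rw [heq]
        apply ih _ hlen' hrest'
        by_cases h : PySem.Set.contains ps c
        · rw [if_pos h]; exact le_trans ha (le_max_left _ _)
        · rw [if_neg h]; exact ha

-- the scan's value is its accumulator or the count of some set member present in the list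
theorem runScan_cases (ps : PySem.Set Char) (n : Nat) :
    ∀ l : List Char, l.length ≤ n → l.Pairwise (· ≤ ·) → ∀ a : Int,
      pvRunScan ps l a = a ∨
        ∃ c, PySem.Set.contains ps c = true ∧ c ∈ l ∧ pvRunScan ps l a = (l.count c : Int) := by
  induction n with
  | zero =>
    intro l hl _ a
    rw [List.length_eq_zero_iff.1 (Nat.le_zero.1 hl)]
    left; simp [pvRunScan]
  | succ n ih =>
    intro l hl hs a
    cases l with
    | nil => left; simp [pvRunScan]
    | cons c rest =>
      rw [pvRunScan_cons]
      have hlen' : (rest.dropWhile (fun s => s == c)).length ≤ n :=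
        dropWhile_le rest c n (by simpa using hl)
      have hrest' : (rest.dropWhile (fun s => s == c)).Pairwise (· ≤ ·) :=
        (List.Pairwise.sublist (List.dropWhile_sublist _)) (List.Pairwise.of_cons hs)
      rcases ih _ hlen' hrest'
          (if PySem.Set.contains ps c then
              max a (1 + ((rest.takeWhile (fun s => s == c)).length : Int))
            else a) with h | ⟨c2, hc2, hmem, hval⟩
      · by_cases hps : PySem.Set.contains ps c
        · rw [h, if_pos hps]
          rcases max_choice a (1 + ((rest.takeWhile (fun s => s == c)).length : Int)) with hm | hm
          · left; exact hm
          · right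
            refine ⟨c, hps, by simp, ?_⟩
            rw [hm, count_head_run c rest hs]
        · left; rw [h, if_neg hps]
      · right
        have hne : c2 ≠ c := by
          intro he
          subst he
          exact lt_irrefl c2 (dropWhile_gt c2 rest hs c2 hmem)
        refine ⟨c2, hc2, List.mem_cons_of_mem _ ((List.dropWhile_sublist _).mem hmem), ?_⟩
        rw [hval]
        exact_mod_cast (congrArg (fun m : Nat => (m : Int)) (count_other c c2 rest hne)).symm

theorem contains_ofList_iff (xs : List Char) (c : Char) :
    PySem.Set.contains (PySem.Set.ofList xs) c = true ↔ c ∈ xs := by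
  unfold PySem.Set.contains
  rw [List.contains_iff_mem]
  exact PySem.Set.mem_ofList xs c

-- ===== VERDICT (by name: the statement is the Claim_ definition above) =====
theorem solution_spec : Claim_equal_solution := by
  intro pettern string _
  unfold Spec_solution solution_alt
  simp only []
  set S := string.toList with hS
  set P := pettern.toList with hP
  set ps : PySem.Set Char := PySem.Set.ofList P with hps
  set cs := PySem.List.sorted S (fun x => x) false with hcs
  have hsorted : cs.Pairwise (· ≤ ·) := PySem.List.sorted_pairwise S (fun x => x)
  have hperm : cs.Perm S := PySem.List.sorted_perm S (fun x => x) false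
  have hcount : ∀ c : Char, (cs.count c : Int) = (S.count c : Int) := by
    intro c
    exact congrArg (fun m : Nat => (m : Int)) (hperm.count_eq c)
  rw [solution_eq_foldA]
  apply le_antisymm
  · apply foldA_le
    · intro p hp
      rw [← hcount p]
      exact runScan_ge_count ps p ((contains_ofList_iff P p).2 hp) cs.length cs le_rfl hsorted 0 le_rfl
    · exact runScan_ge_init ps cs.length cs le_rfl 0
  · rcases runScan_cases ps cs.length cs le_rfl hsorted 0 with h | ⟨c, hc, _, hval⟩
    · rw [h]
      exact foldA_ge_init _ P 0
    · rw [hval, hcount c]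
      exact foldA_ge_elem _ P c ((contains_ofList_iff P c).1 hc) 0
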